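-- pv_equiv track=rewrite | github.com/ayu-04/Genetic-Algo-TSP | GA.py | resolve_conflicts
-- ===== SOURCE A (Python) =====
-- def resolve_conflicts(child, parent2):
--     """Performs conflict resolution to make sure child is a valid path."""
--     missing = [city for city in parent2 if city not in child]
--     new_child = []
--     for city in child:
--         if city is None:
--             new_child.append(missing.pop(0))
--         else:
--             new_child.append(city)
--     return new_child
-- ===== SOURCE B (Python) =====
-- def resolve_conflicts(child, parent2):
--     """Performs conflict resolution to make sure child is a valid path."""
--     missing = [city for city in parent2 if city not in child]
--     none_positions = [i for i, city in enumerate(child) if city is None]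
--     new_child = list(child)
--     for k, pos in enumerate(none_positions):
--         new_child[pos] = missing[k]
--     return new_child
-- ===== Notes on version B (the rewrite author's own statement) =====
-- stated objective: alternative
-- what changed: Instead of streaming through child while destructively popping missing from the front, B precomputes the list of None positions and fills a copy of child by positional assignment new_child[pos] = missing[k].
import Mathlib
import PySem

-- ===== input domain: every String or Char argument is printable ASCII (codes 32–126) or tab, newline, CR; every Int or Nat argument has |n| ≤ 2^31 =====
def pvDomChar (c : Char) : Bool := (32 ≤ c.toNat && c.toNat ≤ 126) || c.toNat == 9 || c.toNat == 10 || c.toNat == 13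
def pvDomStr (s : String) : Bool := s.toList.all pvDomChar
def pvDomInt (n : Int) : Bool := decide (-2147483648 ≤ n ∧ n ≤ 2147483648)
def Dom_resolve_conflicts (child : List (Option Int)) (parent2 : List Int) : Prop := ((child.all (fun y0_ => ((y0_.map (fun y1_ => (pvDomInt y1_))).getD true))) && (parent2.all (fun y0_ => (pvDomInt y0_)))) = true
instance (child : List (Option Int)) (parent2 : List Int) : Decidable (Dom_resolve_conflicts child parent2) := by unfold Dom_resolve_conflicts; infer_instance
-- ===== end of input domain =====

-- B fills a copy of child by positional assignment into precomputed None positions instead of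
-- streaming through child while popping the missing list from the front (objective: alternative
-- decomposition, same cost). A and B raise IndexError on the same inputs; Pre_ excludes them.

-- ===== PORT A =====
-- the for-loop of A: state is (remaining missing, accumulated new_child)
def pvGoA : List (Option Int) → List Int → List Int → List Int
  | [], _, acc => acc
  | none :: rest, missing, acc =>
      match missing with
      | [] => acc            -- Python: missing.pop(0) raises IndexError here (excluded by Pre_)
      | m :: ms => pvGoA rest ms (acc ++ [m])
  | some c :: rest, missing, acc => pvGoA rest missing (acc ++ [c])

def resolve_conflicts (child : List (Option Int)) (parent2 : List Int) : List Int :=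
  let missing := parent2.filter (fun city => !(child.contains (some city)))
  pvGoA child missing []

-- ===== PORT B =====
def resolve_conflicts_alt (child : List (Option Int)) (parent2 : List Int) : List Int :=
  let missing := parent2.filter (fun city => !(child.contains (some city)))
  let none_positions := (PySem.List.enumerate child).filterMap
      (fun p => if p.2 = none then some p.1 else none)
  -- for k, pos in enumerate(none_positions): new_child[pos] = missing[k]
  -- (pos comes from enumerate so 0 ≤ pos; missing[k] raises IndexError in Python when
  --  k ≥ len(missing) — excluded by Pre_; pyGetD's default is never reached under Pre_)
  let filled := (none_positions.foldl
      (fun (st : List (Option Int) × Int) pos =>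
        (st.1.set pos.toNat (some (PySem.List.pyGetD missing st.2 0)), st.2 + 1))
      (child, 0)).1
  -- new_child now holds plain cities; extract them (drops a None only outside Pre_)
  filled.filterMap id

-- ===== PRECONDITION & SPEC =====
-- Pre_ excludes exactly the inputs where A raises IndexError (pop(0) on an empty missing list):
-- those with more None slots in child than cities of parent2 absent from child. B raises there too.
def Pre_resolve_conflicts (child : List (Option Int)) (parent2 : List Int) : Prop :=
  child.count none ≤ (parent2.filter (fun city => !(child.contains (some city)))).length
instance (child : List (Option Int)) (parent2 : List Int) : Decidable (Pre_resolve_conflicts child parent2) := by unfold Pre_resolve_conflicts; infer_instance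

def pvWitness_resolve_conflicts : List (Option Int) × List Int := ([some 1, none, some 2, none], [3, 1, 4, 2])

def Spec_resolve_conflicts (child : List (Option Int)) (parent2 : List Int) (out : List Int) : Prop := out = resolve_conflicts_alt child parent2
instance (child : List (Option Int)) (parent2 : List Int) (out : List Int) : Decidable (Spec_resolve_conflicts child parent2 out) := by unfold Spec_resolve_conflicts; infer_instance

-- ===== CLAIM (what is proved, stated in full; the proofs are below) =====
def Claim_equal_resolve_conflicts : Prop := ∀ (child : List (Option Int)) (parent2 : List Int), Dom_resolve_conflicts child parent2 → Pre_resolve_conflicts child parent2 → Spec_resolve_conflicts child parent2 (resolve_conflicts child parent2)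

-- ===== LEMMAS AND PROOFS =====

-- sequential fill: the common characterisation of both programs
def pvFill : List (Option Int) → List Int → List Int
  | [], _ => []
  | none :: _, [] => []
  | none :: rest, m :: ms => m :: pvFill rest ms
  | some c :: rest, ms => c :: pvFill rest ms

-- option-level fill: what B's foldl of sets produces
def pvFillO : List (Option Int) → List Int → List (Option Int)
  | [], _ => []
  | none :: rest, ms => some (ms.headD 0) :: pvFillO rest ms.tail
  | some c :: rest, ms => some c :: pvFillO rest ms

-- relative None positions
def pvPos : List (Option Int) → List Nat
  | [] => []
  | none :: rest => 0 :: (pvPos rest).map (· + 1)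
  | some _ :: rest => (pvPos rest).map (· + 1)

theorem pvGoA_eq (child : List (Option Int)) :
    ∀ missing acc, pvGoA child missing acc = acc ++ pvFill child missing := by
  induction child with
  | nil => intro missing acc; simp [pvGoA, pvFill]
  | cons x rest ih =>
    intro missing acc
    cases x with
    | none =>
      cases missing with
      | nil => simp [pvGoA, pvFill]
      | cons m ms => simp [pvGoA, pvFill, ih]
    | some c => simp [pvGoA, pvFill, ih]

theorem pvPos_enum (child : List (Option Int)) : ∀ (s : Int),
    (PySem.List.enumerate child s).filterMap (fun p => if p.2 = none then some p.1 else none)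
      = (pvPos child).map (fun n : Nat => (n : Int) + s) := by
  induction child with
  | nil => intro s; simp [PySem.List.enumerate_nil, pvPos]
  | cons x rest ih =>
    intro s
    cases x with
    | none =>
      simp [PySem.List.enumerate_cons, pvPos, ih (s + 1), List.map_map, Function.comp]
      intro a _; omega
    | some c =>
      simp [PySem.List.enumerate_cons, pvPos, ih (s + 1), List.map_map, Function.comp]
      intro a _; omega

-- shifting lemma: folding over positions shifted by +1 over (x :: rest) keeps x and acts on rest
theorem pvFold_shift (missing : List Int) (ps : List Nat) :
    ∀ (x : Option Int) (rest : List (Option Int)) (k : Int),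
    (ps.map (fun n : Nat => (n : Int) + 1)).foldl
        (fun (st : List (Option Int) × Int) pos =>
          (st.1.set pos.toNat (some (PySem.List.pyGetD missing st.2 0)), st.2 + 1))
        (x :: rest, k)
      = (fun q : List (Option Int) × Int => (x :: q.1, q.2))
          ((ps.map (fun n : Nat => (n : Int))).foldl
            (fun (st : List (Option Int) × Int) pos =>
              (st.1.set pos.toNat (some (PySem.List.pyGetD missing st.2 0)), st.2 + 1))
            (rest, k)) := by
  induction ps with
  | nil => intro x rest k; simp
  | cons p ps ih =>
    intro x rest k
    simp only [List.map_cons, List.foldl_cons]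
    have h1 : ((p : Int) + 1).toNat = p + 1 := by omega
    have h2 : ((p : Int)).toNat = p := by omega
    simp only [h1, h2, List.set_cons_succ]
    exact ih x _ (k + 1)

theorem pvFold_fillO (child : List (Option Int)) (missing : List Int) :
    ∀ (k : Int), 0 ≤ k →
    (((pvPos child).map (fun n : Nat => (n : Int))).foldl
        (fun (st : List (Option Int) × Int) pos =>
          (st.1.set pos.toNat (some (PySem.List.pyGetD missing st.2 0)), st.2 + 1))
        (child, k)).1
      = pvFillO child (missing.drop k.toNat) := by
  induction child with
  | nil => intro k _; simp [pvPos, pvFillO]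
  | cons x rest ih =>
    intro k hk
    cases x with
    | none =>
      simp only [pvPos, List.map_cons, List.map_map, List.foldl_cons]
      have hcomp : ((fun n : Nat => (n : Int)) ∘ (· + 1)) = (fun n : Nat => (n : Int) + 1) := by
        funext n; simp
      have hset : (((none : Option Int) :: rest).set ((0 : Nat) : Int).toNat
            (some (PySem.List.pyGetD missing k 0)), k + 1)
          = (some (PySem.List.pyGetD missing k 0) :: rest, k + 1) := by
        simp
      rw [hset, hcomp, pvFold_shift]
      simp only
      rw [ih (k + 1) (by omega)]
      simp only [pvFillO]
      congr 1
      · rw [show PySem.List.pyGetD missing k 0 = missing.getD k.toNat 0 from by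
          rw [show k = ((k.toNat : Nat) : Int) from by omega, PySem.List.pyGetD_natCast, Int.toNat_natCast]]
        cases h : missing.drop k.toNat with
        | nil =>
          have hlen : missing.length ≤ k.toNat := by
            by_contra hlt
            have := List.length_drop (l := missing) (i := k.toNat)
            rw [h] at this; simp at this; omega
          simp [List.getD, List.getElem?_eq_none (by omega)]
        | cons m ms =>
          have hm : missing[k.toNat]? = some m := by
            have h0 : (missing.drop k.toNat)[0]? = missing[k.toNat + 0]? := List.getElem?_drop
            rw [h] at h0; simpa using h0.symm
          simp [List.getD, hm]
      · have ht : (k + 1).toNat = k.toNat + 1 := by omega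
        rw [ht]
        congr 1
        rw [← List.drop_drop]
        cases h : missing.drop k.toNat <;> simp
    | some c =>
      simp only [pvPos, List.map_map]
      have hcomp : ((fun n : Nat => (n : Int)) ∘ (· + 1)) = (fun n : Nat => (n : Int) + 1) := by
        funext n; simp
      rw [hcomp, pvFold_shift]
      simp only
      rw [ih k hk]
      simp [pvFillO]

theorem pvFillO_fill (child : List (Option Int)) :
    ∀ missing, child.count none ≤ missing.length →
    (pvFillO child missing).filterMap id = pvFill child missing := by
  induction child with
  | nil => intro missing _; simp [pvFillO, pvFill]
  | cons x rest ih =>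
    intro missing h
    cases x with
    | none =>
      cases missing with
      | nil => simp at h
      | cons m ms =>
        have h' : rest.count none ≤ ms.length := by
          simp at h; omega
        simp only [pvFillO, pvFill, List.headD_cons, List.tail_cons]
        exact congrArg (List.cons m) (ih ms h')
    | some c =>
      have h' : rest.count none ≤ missing.length := by
        simp at h; omega
      simp only [pvFillO, pvFill]
      exact congrArg (List.cons c) (ih missing h')

-- ===== VERDICT (by name: the statement is the Claim_ definition above) =====
theorem resolve_conflicts_spec : Claim_equal_resolve_conflicts := by
  intro child parent2 _ hpre
  unfold Spec_resolve_conflicts resolve_conflicts resolve_conflicts_alt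
  simp only
  rw [pvGoA_eq, pvPos_enum child 0]
  have hsh : ((pvPos child).map (fun n : Nat => (n : Int) + 0))
      = (pvPos child).map (fun n : Nat => (n : Int)) := by simp
  rw [hsh]
  have hfold := pvFold_fillO child
      (parent2.filter (fun city => !(child.contains (some city)))) 0 (by omega)
  rw [show ((0 : Int).toNat) = 0 from rfl, List.drop_zero] at hfold
  rw [hfold, pvFillO_fill child _ (by unfold Pre_resolve_conflicts at hpre; simpa using hpre)]
  simp
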